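-- pv_equiv track=rewrite | github.com/wcwright124/my_sols | epi_judge_python/enumerate_palindromic_decompositions.py | palindrome_decompositions
-- ===== SOURCE A (Python) =====
-- def is_palindromic_substring(s, i, j):
--     if i > j:
--         raise ValueError('j must be greater than or equal to i')
--     while i < j:
--         if s[i] != s[j]:
--             return False
--         i += 1
--         j -= 1
--     return True
--
-- def palindrome_decompositions(s):
--     def helper(start, partial):
--         if start == n:
--             res.append(partial)
--             return
--         for i in range(start, n):
--             if is_palindromic_substring(s, start, i):
--                 helper(i+1, partial + [s[start:i+1]])
--         return
--     # TODO - you fill in here.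
--     res = []
--     n = len(s)
--     helper(0, [])
--     return res
-- ===== SOURCE B (Python) =====
-- def palindrome_decompositions(s):
--     n = len(s)
--     # tails[k] = all palindromic decompositions of the suffix of length k (s[n-k:])
--     tails = [[[]]]
--     for start in range(n - 1, -1, -1):
--         cur = []
--         for i in range(start, n):
--             piece = s[start:i + 1]
--             if piece == piece[::-1]:
--                 for rest in tails[n - 1 - i]:
--                     cur.append([piece] + rest)
--         tails.append(cur)
--     return tails[n]
-- ===== Notes on version B (the rewrite author's own statement) =====
-- stated objective: alternative
-- what changed: Replaces A's top-down DFS (accumulator list threaded through recursion, two-pointer palindrome test per node) by a bottom-up dynamic program that builds the table of decompositions of every suffix once and uses a slice-vs-reversed-slice palindrome test.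
import Mathlib
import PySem

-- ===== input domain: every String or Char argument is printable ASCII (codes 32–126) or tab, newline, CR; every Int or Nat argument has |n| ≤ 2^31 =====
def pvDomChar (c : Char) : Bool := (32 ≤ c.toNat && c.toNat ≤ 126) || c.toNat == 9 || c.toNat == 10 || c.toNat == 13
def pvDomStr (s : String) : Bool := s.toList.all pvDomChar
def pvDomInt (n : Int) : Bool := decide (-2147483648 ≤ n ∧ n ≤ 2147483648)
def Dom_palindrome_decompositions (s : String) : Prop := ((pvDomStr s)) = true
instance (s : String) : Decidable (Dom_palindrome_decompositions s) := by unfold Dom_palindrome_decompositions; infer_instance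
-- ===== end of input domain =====

-- B replaces A's top-down DFS (partial list threaded through the recursion, two-pointer
-- palindrome test) by a bottom-up table of decompositions of every suffix, with a
-- slice-equals-reversed-slice palindrome test; same outputs in the same order.

-- ===== PORT A =====
-- A's is_palindromic_substring: two-pointer scan; A only ever calls it with 0 ≤ i ≤ j < len(s),
-- so the ValueError branch (i > j) is unreachable and the indexings s[i], s[j] are in range.
def pdIsPal (s : List Char) (i j : Nat) : Bool :=
  if i < j then
    if PySem.List.pyGet? s (i : Int) = PySem.List.pyGet? s (j : Int) then
      pdIsPal s (i + 1) (j - 1)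
    else false
  else true
termination_by j - i
decreasing_by omega

-- s[start:i+1]
def pdPiece (s : List Char) (start i : Nat) : List Char :=
  PySem.List.slice s (some (start : Int)) (some ((i : Int) + 1))

-- A's nested helper; the res-accumulation is read out functionally: each call returns the
-- block of decompositions it would append to res, in the same (DFS) order.
def pdHelper (s : List Char) (n : Nat) (start : Nat) (part : List String) : List (List String) :=
  if start = n then [part]
  else
    (List.range' start (n - start)).attach.foldl
      (fun acc x =>
        if pdIsPal s start x.1 then
          acc ++ pdHelper s n (x.1 + 1) (part ++ [String.ofList (pdPiece s start x.1)])
        else acc) []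
termination_by n - start
decreasing_by
  have := List.mem_range'_1.mp x.2
  omega

def palindrome_decompositions (s : String) : List (List String) :=
  pdHelper s.toList s.toList.length 0 []

-- ===== PORT B =====
-- Source B: tails[k] = decompositions of the suffix of length k; built from the empty suffix up.
-- piece == piece[::-1] is the reversed-slice test (PySem.List.slice?_none_none_neg_one: [::-1] is reverse).
def pdTails (s : List Char) (n : Nat) : List (List (List String)) :=
  (List.range n).foldl
    (fun tails k =>
      let start := n - 1 - k
      tails ++ [(List.range' start (n - start)).foldl
        (fun cur i =>
          let piece := pdPiece s start i
          if piece = piece.reverse then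
            cur ++ (tails.getD (n - 1 - i) []).map (fun rest => String.ofList piece :: rest)
          else cur) []])
    [[[]]]

def palindrome_decompositions_alt (s : String) : List (List String) :=
  (pdTails s.toList s.toList.length).getD s.toList.length []

-- ===== PRECONDITION & SPEC =====
def Spec_palindrome_decompositions (s : String) (out : List (List String)) : Prop := out = palindrome_decompositions_alt s
instance (s : String) (out : List (List String)) : Decidable (Spec_palindrome_decompositions s out) := by unfold Spec_palindrome_decompositions; infer_instance

-- ===== CLAIM (what is proved, stated in full; the proofs are below) =====
def Claim_equal_palindrome_decompositions : Prop := ∀ (s : String), Dom_palindrome_decompositions s → Spec_palindrome_decompositions s (palindrome_decompositions s)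

-- ===== LEMMAS AND PROOFS =====

-- Clean reference recursion (fuel-indexed, fuel ≥ n - start): all palindromic
-- decompositions of the suffix starting at `start`.
def pdDecomp (s : List Char) (n : Nat) : Nat → Nat → List (List String)
  | 0, _ => [[]]
  | fuel + 1, start =>
    if start = n then [[]]
    else
      (List.range' start (n - start)).foldl
        (fun acc i =>
          if pdIsPal s start i then
            acc ++ (pdDecomp s n fuel (i + 1)).map (fun r => String.ofList (pdPiece s start i) :: r)
          else acc) []

lemma pdPiece_eq (s : List Char) (i j : Nat) :
    pdPiece s i j = (s.drop i).take (j + 1 - i) := by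
  unfold pdPiece
  rw [show ((j : Int) + 1) = ((j + 1 : Nat) : Int) by push_cast; ring]
  rw [PySem.List.slice_natCast]

lemma pd_foldl_congr {α β : Type} (f g : List β → α → List β) :
    ∀ (l : List α), (∀ acc x, x ∈ l → f acc x = g acc x) → ∀ a, l.foldl f a = l.foldl g a := by
  intro l
  induction l with
  | nil => intro _ a; rfl
  | cons y ys ih =>
    intro h a
    simp only [List.foldl_cons]
    rw [h a y (by simp)]
    exact ih (fun acc x hx => h acc x (by simp [hx])) _

lemma pd_foldl_attach {α β : Type} (l : List α) (f : β → α → β) (b : β) :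
    l.attach.foldl (fun acc x => f acc x.1) b = l.foldl f b := by
  conv_rhs => rw [← List.attach_map_subtype_val l]
  rw [List.foldl_map]

lemma pd_foldl_append_map {α β γ : Type} (m : β → γ) (p : α → Bool)
    (g : α → List γ) (h : α → List β) :
    ∀ (l : List α), (∀ x ∈ l, g x = (h x).map m) → ∀ a : List β,
      l.foldl (fun acc x => if p x then acc ++ g x else acc) (a.map m)
        = (l.foldl (fun acc x => if p x then acc ++ h x else acc) a).map m := by
  intro l
  induction l with
  | nil => intro _ a; rfl
  | cons y ys ih =>
    intro hgh a
    simp only [List.foldl_cons]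
    by_cases hp : p y = true
    · simp only [hp, if_true]
      rw [hgh y (by simp), ← List.map_append]
      exact ih (fun x hx => hgh x (by simp [hx])) _
    · simp only [hp]
      exact ih (fun x hx => hgh x (by simp [hx])) _

-- The fuel does not matter once it is at least n - start.
lemma pdDecomp_fuel (s : List Char) (n : Nat) :
    ∀ (f1 f2 start : Nat), start ≤ n → n - start ≤ f1 → n - start ≤ f2 →
      pdDecomp s n f1 start = pdDecomp s n f2 start := by
  intro f1
  induction f1 with
  | zero =>
    intro f2 start hs h1 h2
    have h : start = n := by omega
    cases f2 <;> simp [pdDecomp, h]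
  | succ f1 ih =>
    intro f2 start hs h1 h2
    cases f2 with
    | zero =>
      have h : start = n := by omega
      simp [pdDecomp, h]
    | succ f2 =>
      rw [pdDecomp, pdDecomp]
      by_cases h : start = n
      · simp [h]
      · rw [if_neg h, if_neg h]
        apply pd_foldl_congr
        intro acc i hi
        have hmem := List.mem_range'_1.mp hi
        have hin : i < n := by omega
        show (if pdIsPal s start i = true then
            acc ++ (pdDecomp s n f1 (i + 1)).map (fun r => String.ofList (pdPiece s start i) :: r)
          else acc) = _
        rw [ih f2 (i + 1) (by omega) (by omega) (by omega)]

-- A's helper returns the suffix decompositions, each prefixed by the partial decomposition.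
lemma pdHelper_eq (s : List Char) (n : Nat) :
    ∀ (fuel start : Nat) (part : List String), start ≤ n → n - start ≤ fuel →
      pdHelper s n start part = (pdDecomp s n fuel start).map (fun r => part ++ r) := by
  intro fuel
  induction fuel with
  | zero =>
    intro start part hs hle
    have h : start = n := by omega
    rw [pdHelper]
    simp [h, pdDecomp]
  | succ fuel ih =>
    intro start part hs hle
    rw [pdHelper, pdDecomp]
    by_cases h : start = n
    · simp [h]
    · rw [if_neg h, if_neg h]
      rw [pd_foldl_attach (List.range' start (n - start))
        (fun acc i => if pdIsPal s start i then
          acc ++ pdHelper s n (i + 1) (part ++ [String.ofList (pdPiece s start i)])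
        else acc) []]
      exact pd_foldl_append_map (fun r => part ++ r)
        (fun i => pdIsPal s start i)
        (fun i => pdHelper s n (i + 1) (part ++ [String.ofList (pdPiece s start i)]))
        (fun i => (pdDecomp s n fuel (i + 1)).map (fun r => String.ofList (pdPiece s start i) :: r))
        (List.range' start (n - start))
        (by
          intro i hi
          have hmem := List.mem_range'_1.mp hi
          have hin : i < n := by omega
          show pdHelper s n (i + 1) (part ++ [String.ofList (pdPiece s start i)])
            = ((pdDecomp s n fuel (i + 1)).map
                (fun r => String.ofList (pdPiece s start i) :: r)).map (fun r => part ++ r)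
          rw [ih (i + 1) (part ++ [String.ofList (pdPiece s start i)]) (by omega) (by omega),
            List.map_map]
          apply List.map_congr_left
          intro r _
          simp)
        []

-- A's two-pointer test agrees with B's slice-vs-reversed-slice test on in-range i ≤ j.
lemma pdIsPal_eq (s : List Char) :
    ∀ (fuel i j : Nat), j - i ≤ fuel → i ≤ j → j < s.length →
      pdIsPal s i j = decide (pdPiece s i j = (pdPiece s i j).reverse) := by
  intro fuel
  induction fuel with
  | zero =>
    intro i j hle hij hj
    have hij' : i = j := by omega
    subst hij'
    rw [pdIsPal, pdPiece_eq, if_neg (lt_irrefl i)]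
    have hd : s.drop i = s[i] :: s.drop (i + 1) := List.drop_eq_getElem_cons hj
    symm
    rw [decide_eq_true_eq, show i + 1 - i = 1 from by omega, hd, List.take_one, List.head?_cons]
    simp
  | succ fuel ih =>
    intro i j hle hij hj
    rw [pdIsPal, pdPiece_eq]
    by_cases hlt : i < j
    · have hi : i < s.length := by omega
      simp only [hlt, if_true, PySem.List.pyGet?_natCast,
        List.getElem?_eq_getElem hi, List.getElem?_eq_getElem hj]
      have hd : s.drop i = s[i] :: s.drop (i + 1) := List.drop_eq_getElem_cons hi
      have ht : (s.drop i).take (j + 1 - i) = s[i] :: (s.drop (i + 1)).take (j - i) := by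
        rw [hd, show j + 1 - i = (j - i) + 1 from by omega, List.take_succ_cons]
      have hmid : (s.drop (i + 1)).take (j - i)
          = (s.drop (i + 1)).take (j - i - 1) ++ [s[j]] := by
        rw [show j - i = (j - i - 1) + 1 from by omega, List.take_add_one]
        have hg : (s.drop (i + 1))[j - i - 1]? = some s[j] := by
          rw [List.getElem?_drop, show i + 1 + (j - i - 1) = j from by omega]
          exact List.getElem?_eq_getElem hj
        rw [hg]
        rfl
      rw [ht, hmid]
      by_cases hc : s[i] = s[j]
      · rw [if_pos (by rw [hc])]
        have hbig : (s[i] :: ((s.drop (i + 1)).take (j - i - 1) ++ [s[j]])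
              = (s[i] :: ((s.drop (i + 1)).take (j - i - 1) ++ [s[j]])).reverse)
            ↔ ((s.drop (i + 1)).take (j - i - 1)
              = ((s.drop (i + 1)).take (j - i - 1)).reverse) := by
          rw [← hc]
          have hrev : (s[i] :: ((s.drop (i + 1)).take (j - i - 1) ++ [s[i]])).reverse
              = s[i] :: (((s.drop (i + 1)).take (j - i - 1)).reverse ++ [s[i]]) := by simp
          rw [hrev]
          constructor
          · intro h
            have h2 := (List.cons.injEq _ _ _ _).mp h
            exact List.append_cancel_right h2.2
          · intro h
            rw [← h]
        rw [decide_eq_decide.mpr hbig]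
        by_cases hij2 : i + 1 ≤ j - 1
        · rw [ih (i + 1) (j - 1) (by omega) hij2 (by omega), pdPiece_eq,
            show j - 1 + 1 - (i + 1) = j - i - 1 from by omega]
        · have hj1 : j = i + 1 := by omega
          subst hj1
          rw [pdIsPal, if_neg (by omega)]
          rw [show i + 1 - i - 1 = 0 from by omega]
          simp
      · rw [if_neg (by simpa using hc)]
        have hne : ¬ (s[i] :: ((s.drop (i + 1)).take (j - i - 1) ++ [s[j]])
            = (s[i] :: ((s.drop (i + 1)).take (j - i - 1) ++ [s[j]])).reverse) := by
          intro h
          rw [show (s[i] :: ((s.drop (i + 1)).take (j - i - 1) ++ [s[j]])).reverse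
              = s[j] :: (((s.drop (i + 1)).take (j - i - 1)).reverse ++ [s[i]]) by simp] at h
          injection h with h1 _
          exact hc h1
        rw [decide_eq_false hne]
    · have hij' : i = j := by omega
      subst hij'
      rw [if_neg hlt]
      have hd : s.drop i = s[i] :: s.drop (i + 1) := List.drop_eq_getElem_cons hj
      symm
      rw [decide_eq_true_eq, show i + 1 - i = 1 from by omega, hd, List.take_one, List.head?_cons]
      simp

-- B's bottom-up fold builds exactly the table of pdDecomp values for growing suffixes.
lemma pdTails_spec (s : List Char) (n : Nat) (hn : n = s.length) :
    ∀ m, m ≤ n →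
      (List.range m).foldl
        (fun tails k =>
          tails ++ [(List.range' (n - 1 - k) (n - (n - 1 - k))).foldl
            (fun cur i =>
              if pdPiece s (n - 1 - k) i = (pdPiece s (n - 1 - k) i).reverse then
                cur ++ (tails.getD (n - 1 - i) []).map
                  (fun rest => String.ofList (pdPiece s (n - 1 - k) i) :: rest)
              else cur) []])
        [[[]]]
      = (List.range (m + 1)).map (fun j => pdDecomp s n j (n - j)) := by
  intro m
  induction m with
  | zero =>
    intro _
    simp [pdDecomp]
  | succ m ih =>
    intro hm
    rw [List.range_succ, List.foldl_append, ih (by omega)]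
    simp only [List.foldl_cons, List.foldl_nil]
    rw [List.range_succ (n := m + 1), List.map_append]
    congr 1
    simp only [List.map_cons, List.map_nil]
    congr 1
    -- the new entry equals pdDecomp s n (m + 1) (n - (m + 1))
    rw [show n - 1 - m = n - (m + 1) from by omega]
    rw [pdDecomp, if_neg (by omega)]
    apply pd_foldl_congr
    intro acc i hi
    have hmem := List.mem_range'_1.mp hi
    have hin : i < n := by omega
    have hpal : (pdIsPal s (n - (m + 1)) i = true)
        = (pdPiece s (n - (m + 1)) i = (pdPiece s (n - (m + 1)) i).reverse) := by
      rw [pdIsPal_eq s n (n - (m + 1)) i (by omega) hmem.1 (by omega)]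
      simp
    have hgetD : (List.map (fun j => pdDecomp s n j (n - j)) (List.range (m + 1))).getD
        (n - 1 - i) [] = pdDecomp s n m (i + 1) := by
      rw [List.getD_eq_getElem?_getD, List.getElem?_map,
        List.getElem?_range (show n - 1 - i < m + 1 from by omega)]
      simp only [Option.map_some, Option.getD_some]
      rw [show n - (n - 1 - i) = i + 1 from by omega]
      exact pdDecomp_fuel s n (n - 1 - i) m (i + 1) (by omega) (by omega) (by omega)
    show (if pdPiece s (n - (m + 1)) i = (pdPiece s (n - (m + 1)) i).reverse then
        acc ++ ((List.map (fun j => pdDecomp s n j (n - j)) (List.range (m + 1))).getD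
          (n - 1 - i) []).map (fun rest => String.ofList (pdPiece s (n - (m + 1)) i) :: rest)
      else acc) = _
    rw [hgetD]
    simp only [← hpal]

-- ===== VERDICT (by name: the statement is the Claim_ definition above) =====
theorem palindrome_decompositions_spec : Claim_equal_palindrome_decompositions := by
  intro s _
  unfold Spec_palindrome_decompositions palindrome_decompositions palindrome_decompositions_alt
  rw [pdHelper_eq s.toList s.toList.length s.toList.length 0 [] (by omega) (by omega)]
  have htails : pdTails s.toList s.toList.length
      = (List.range (s.toList.length + 1)).map
          (fun j => pdDecomp s.toList s.toList.length j (s.toList.length - j)) :=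
    pdTails_spec s.toList s.toList.length rfl s.toList.length le_rfl
  rw [htails]
  rw [List.getD_eq_getElem?_getD, List.getElem?_map, List.getElem?_range (by omega)]
  simp
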